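-- pv_equiv track=rewrite | github.com/Anxten/omni-agent | src/cli/main.py | _classify_commit_subject
-- ===== SOURCE A (Python) =====
-- def _classify_commit_subject(paths: list[str], best_type: str) -> str:
--     lowered_paths = [path.lower() for path in paths]
--
--     if any(path.endswith((".md", ".rst", ".txt")) or "/docs/" in path or path.startswith("docs/") for path in lowered_paths):
--         return "documentation"
--
--     if any(
--         path.endswith((".json", ".yaml", ".yml", ".toml", ".ini", ".cfg", ".conf", ".env"))
--         or path in {"package.json", "package-lock.json", "pnpm-lock.yaml", "requirements.txt", "pyproject.toml", "poetry.lock", "tsconfig.json"}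
--         or path.endswith(".gitignore")
--         for path in lowered_paths
--     ):
--         return "project configuration"
--
--     if any(path.startswith("src/cli/") for path in lowered_paths):
--         return "commit workflow"
--
--     if any(path.startswith("src/core/") for path in lowered_paths):
--         return "LLM pipeline"
--
--     if any(path.startswith("src/agents/") for path in lowered_paths):
--         return "agent orchestration"
--
--     if any(path.startswith("src/") for path in lowered_paths):
--         return "codebase workflow"
--
--     if best_type == "Docs":
--         return "documentation"
--     if best_type == "Chore":
--         return "project configuration"
--     if best_type == "Fix":
--         return "bug handling"
--     if best_type == "Feat":
--         return "new capability"
--     return "codebase"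
-- ===== SOURCE B (Python) =====
-- _FALLBACK = {"Docs": "documentation", "Chore": "project configuration",
--              "Fix": "bug handling", "Feat": "new capability"}
--
-- def _classify_commit_subject(paths: list[str], best_type: str) -> str:
--     docs = cfg = cli = core = agents = src = False
--     for path in paths:
--         p = path.lower()
--         docs = docs or p.endswith((".md", ".rst", ".txt")) or "/docs/" in p or p.startswith("docs/")
--         cfg = (cfg or p.endswith((".json", ".yaml", ".yml", ".toml", ".ini", ".cfg", ".conf", ".env"))
--                or p in {"package.json", "package-lock.json", "pnpm-lock.yaml", "requirements.txt",
--                         "pyproject.toml", "poetry.lock", "tsconfig.json"}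
--                or p.endswith(".gitignore"))
--         cli = cli or p.startswith("src/cli/")
--         core = core or p.startswith("src/core/")
--         agents = agents or p.startswith("src/agents/")
--         src = src or p.startswith("src/")
--     for flag, label in ((docs, "documentation"), (cfg, "project configuration"),
--                         (cli, "commit workflow"), (core, "LLM pipeline"),
--                         (agents, "agent orchestration"), (src, "codebase workflow")):
--         if flag:
--             return label
--     return _FALLBACK.get(best_type, "codebase")
-- ===== Notes on version B (the rewrite author's own statement) =====
-- stated objective: alternative
-- what changed: Replaces A's six sequential any() scans over the lowered paths with a single pass that accumulates one boolean flag per category, followed by a fixed-priority resolution loop and a dict-based fallback.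
import Mathlib
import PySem

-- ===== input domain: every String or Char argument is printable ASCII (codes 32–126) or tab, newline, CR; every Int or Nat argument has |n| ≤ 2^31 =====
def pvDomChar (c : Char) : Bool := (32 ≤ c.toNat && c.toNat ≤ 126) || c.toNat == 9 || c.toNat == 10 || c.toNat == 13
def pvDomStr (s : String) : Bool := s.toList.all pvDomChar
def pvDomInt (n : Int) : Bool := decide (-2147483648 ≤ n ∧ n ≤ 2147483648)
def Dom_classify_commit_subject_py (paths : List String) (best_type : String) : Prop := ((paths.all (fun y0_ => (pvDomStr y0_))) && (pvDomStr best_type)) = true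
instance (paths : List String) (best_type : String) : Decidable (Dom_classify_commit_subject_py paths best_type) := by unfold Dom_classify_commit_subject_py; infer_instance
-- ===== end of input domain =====

-- ===== PORT A =====
-- Port of A: six sequential any() scans over the lowered paths, then a best_type if-chain.
-- Shared predicate helpers (identical predicate expressions appear in both Pythons).
def docsPred (p : String) : Bool :=
  PySem.Str.endswith p ".md" || PySem.Str.endswith p ".rst" || PySem.Str.endswith p ".txt" ||
  PySem.Str.isIn "/docs/" p || PySem.Str.startswith p "docs/"

def cfgPred (p : String) : Bool :=
  (PySem.Str.endswith p ".json" || PySem.Str.endswith p ".yaml" || PySem.Str.endswith p ".yml" ||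
   PySem.Str.endswith p ".toml" || PySem.Str.endswith p ".ini" || PySem.Str.endswith p ".cfg" ||
   PySem.Str.endswith p ".conf" || PySem.Str.endswith p ".env") ||
  (p == "package.json" || p == "package-lock.json" || p == "pnpm-lock.yaml" ||
   p == "requirements.txt" || p == "pyproject.toml" || p == "poetry.lock" || p == "tsconfig.json") ||
  PySem.Str.endswith p ".gitignore"

def classify_commit_subject_py (paths : List String) (best_type : String) : String :=
  let lowered := paths.map PySem.Str.lower
  if lowered.any docsPred then "documentation"
  else if lowered.any cfgPred then "project configuration"
  else if lowered.any (fun p => PySem.Str.startswith p "src/cli/") then "commit workflow"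
  else if lowered.any (fun p => PySem.Str.startswith p "src/core/") then "LLM pipeline"
  else if lowered.any (fun p => PySem.Str.startswith p "src/agents/") then "agent orchestration"
  else if lowered.any (fun p => PySem.Str.startswith p "src/") then "codebase workflow"
  else if best_type == "Docs" then "documentation"
  else if best_type == "Chore" then "project configuration"
  else if best_type == "Fix" then "bug handling"
  else if best_type == "Feat" then "new capability"
  else "codebase"

-- ===== PORT B =====
-- Port of B: one pass accumulating six category flags, then a priority-resolution loop
-- and a dict-based fallback.
def pvFallback : PySem.Dict String String :=
  PySem.Dict.ofList [("Docs", "documentation"), ("Chore", "project configuration"),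
                     ("Fix", "bug handling"), ("Feat", "new capability")]

def pvResolve : List (Bool × String) → String → String
  | [], bt => PySem.Dict.getD pvFallback bt "codebase"
  | (b, l) :: rest, bt => if b then l else pvResolve rest bt

def pvStep (st : Bool × Bool × Bool × Bool × Bool × Bool) (path : String) :
    Bool × Bool × Bool × Bool × Bool × Bool :=
  let p := PySem.Str.lower path
  (st.1 || docsPred p, st.2.1 || cfgPred p,
   st.2.2.1 || PySem.Str.startswith p "src/cli/",
   st.2.2.2.1 || PySem.Str.startswith p "src/core/",
   st.2.2.2.2.1 || PySem.Str.startswith p "src/agents/",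
   st.2.2.2.2.2 || PySem.Str.startswith p "src/")

def classify_commit_subject_py_alt (paths : List String) (best_type : String) : String :=
  let st := paths.foldl pvStep (false, false, false, false, false, false)
  pvResolve [(st.1, "documentation"), (st.2.1, "project configuration"),
             (st.2.2.1, "commit workflow"), (st.2.2.2.1, "LLM pipeline"),
             (st.2.2.2.2.1, "agent orchestration"), (st.2.2.2.2.2, "codebase workflow")] best_type

-- ===== PRECONDITION & SPEC =====
def Spec_classify_commit_subject_py (paths : List String) (best_type : String) (out : String) : Prop := out = classify_commit_subject_py_alt paths best_type
instance (paths : List String) (best_type : String) (out : String) : Decidable (Spec_classify_commit_subject_py paths best_type out) := by unfold Spec_classify_commit_subject_py; infer_instance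

-- ===== CLAIM (what is proved, stated in full; the proofs are below) =====
def Claim_equal_classify_commit_subject_py : Prop := ∀ (paths : List String) (best_type : String), Dom_classify_commit_subject_py paths best_type → Spec_classify_commit_subject_py paths best_type (classify_commit_subject_py paths best_type)

-- ===== LEMMAS AND PROOFS =====
theorem foldl_pvStep (paths : List String) (a b c d e f : Bool) :
    paths.foldl pvStep (a, b, c, d, e, f) =
      (a || (paths.map PySem.Str.lower).any docsPred,
       b || (paths.map PySem.Str.lower).any cfgPred,
       c || (paths.map PySem.Str.lower).any (fun p => PySem.Str.startswith p "src/cli/"),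
       d || (paths.map PySem.Str.lower).any (fun p => PySem.Str.startswith p "src/core/"),
       e || (paths.map PySem.Str.lower).any (fun p => PySem.Str.startswith p "src/agents/"),
       f || (paths.map PySem.Str.lower).any (fun p => PySem.Str.startswith p "src/")) := by
  induction paths generalizing a b c d e f with
  | nil => simp
  | cons x xs ih => simp [pvStep, ih, Bool.or_assoc]

theorem getD_pvFallback (bt : String) :
    PySem.Dict.getD pvFallback bt "codebase" =
      if bt == "Docs" then "documentation"
      else if bt == "Chore" then "project configuration"
      else if bt == "Fix" then "bug handling"
      else if bt == "Feat" then "new capability"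
      else "codebase" := by
  by_cases h1 : bt = "Docs"
  · subst h1; decide
  by_cases h2 : bt = "Chore"
  · subst h2; decide
  by_cases h3 : bt = "Fix"
  · subst h3; decide
  by_cases h4 : bt = "Feat"
  · subst h4; decide
  have e1 : ("Docs" == bt) = false := beq_eq_false_iff_ne.mpr (fun h => h1 h.symm)
  have e2 : ("Chore" == bt) = false := beq_eq_false_iff_ne.mpr (fun h => h2 h.symm)
  have e3 : ("Fix" == bt) = false := beq_eq_false_iff_ne.mpr (fun h => h3 h.symm)
  have e4 : ("Feat" == bt) = false := beq_eq_false_iff_ne.mpr (fun h => h4 h.symm)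
  simp [pvFallback, PySem.Dict.getD, PySem.Dict.get?, PySem.Dict.ofList, PySem.Dict.empty,
    PySem.Dict.update, PySem.Dict.insert, PySem.Dict.contains, List.find?, e1, e2, e3, e4,
    h1, h2, h3, h4]

-- ===== VERDICT (by name: the statement is the Claim_ definition above) =====
theorem classify_commit_subject_py_spec : Claim_equal_classify_commit_subject_py := by
  intro paths best_type _
  unfold Spec_classify_commit_subject_py classify_commit_subject_py classify_commit_subject_py_alt
  simp only [foldl_pvStep, Bool.false_or, pvResolve, getD_pvFallback]
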